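-- pv_equiv track=rewrite | github.com/EndlessReform/2048former | docs/reference-evaluation.py | _encode_rows_from_matrix
-- ===== SOURCE A (Python) =====
-- N = 4
--
-- def _encode_rows_from_matrix(matrix) -> list[int]:
--     keys = []
--     for y in range(N):
--         key = 0
--         for x in range(N):
--             key = key * 32 + int(matrix[y][x])
--         keys.append(key)
--     return keys
-- ===== SOURCE B (Python) =====
-- N = 4
--
-- def _encode_rows_from_matrix(matrix) -> list[int]:
--     # Column-major: one staged pass per column, updating all row keys at once.
--     keys = [0] * N
--     for x in range(N):
--         keys = [key * 32 + int(matrix[y][x]) for y, key in enumerate(keys)]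
--     return keys
-- ===== Notes on version B (the rewrite author's own statement) =====
-- stated objective: alternative
-- what changed: A walks the matrix row by row, finishing each key with an inner Horner loop before appending it; B transposes the traversal: it keeps a vector of all four partial keys and makes one pass per COLUMN, updating every row's accumulator simultaneously, so no key is ever complete before the last column pass.
import Mathlib
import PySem

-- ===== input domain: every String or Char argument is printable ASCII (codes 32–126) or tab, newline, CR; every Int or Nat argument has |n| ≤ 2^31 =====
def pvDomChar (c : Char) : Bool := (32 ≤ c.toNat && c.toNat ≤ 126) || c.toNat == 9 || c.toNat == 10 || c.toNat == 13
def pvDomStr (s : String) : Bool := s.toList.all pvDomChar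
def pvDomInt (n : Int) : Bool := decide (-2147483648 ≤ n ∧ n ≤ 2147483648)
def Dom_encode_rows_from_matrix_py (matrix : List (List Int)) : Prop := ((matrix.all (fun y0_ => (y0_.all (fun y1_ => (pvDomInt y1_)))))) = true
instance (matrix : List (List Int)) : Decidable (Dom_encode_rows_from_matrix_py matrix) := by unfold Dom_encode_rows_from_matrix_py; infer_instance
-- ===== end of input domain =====

-- B transposes A's traversal: instead of finishing each key row by row with an inner
-- Horner loop, B keeps all four partial keys and updates them together in one pass per column.

-- ===== PORT A =====
def encode_rows_from_matrix_py (matrix : List (List Int)) : List Int :=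
  (PySem.List.pyRange 0 4 1).foldl (fun keys y =>
    keys ++ [(PySem.List.pyRange 0 4 1).foldl (fun key x =>
      key * 32 + PySem.List.pyGetD (PySem.List.pyGetD matrix y []) x 0) 0]) []

-- ===== PORT B =====
def encode_rows_from_matrix_py_alt (matrix : List (List Int)) : List Int :=
  (PySem.List.pyRange 0 4 1).foldl (fun keys x =>
    (PySem.List.enumerate keys).map (fun yk =>
      yk.2 * 32 + PySem.List.pyGetD (PySem.List.pyGetD matrix yk.1 []) x 0))
    [0, 0, 0, 0]

-- ===== PRECONDITION & SPEC =====
-- A indexes matrix[y][x] for y, x in range(4): it raises IndexError unless there are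
-- at least 4 rows and each of the first 4 rows has at least 4 entries.
def Pre_encode_rows_from_matrix_py (matrix : List (List Int)) : Prop :=
  4 ≤ matrix.length ∧ ∀ r ∈ matrix.take 4, 4 ≤ r.length
instance (matrix : List (List Int)) : Decidable (Pre_encode_rows_from_matrix_py matrix) := by
  unfold Pre_encode_rows_from_matrix_py; infer_instance
def pvWitness_encode_rows_from_matrix_py : List (List Int) :=
  [[1, 2, 3, 4], [5, 6, 7, 8], [0, 0, 0, 0], [31, 31, 31, 31]]
def Spec_encode_rows_from_matrix_py (matrix : List (List Int)) (out : List Int) : Prop := out = encode_rows_from_matrix_py_alt matrix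
instance (matrix : List (List Int)) (out : List Int) : Decidable (Spec_encode_rows_from_matrix_py matrix out) := by unfold Spec_encode_rows_from_matrix_py; infer_instance

-- ===== CLAIM (what is proved, stated in full; the proofs are below) =====
def Claim_equal_encode_rows_from_matrix_py : Prop := ∀ (matrix : List (List Int)), Dom_encode_rows_from_matrix_py matrix → Pre_encode_rows_from_matrix_py matrix → Spec_encode_rows_from_matrix_py matrix (encode_rows_from_matrix_py matrix)

-- ===== LEMMAS AND PROOFS =====
theorem pyGetD_cons4 (a0 a1 a2 a3 : Int) (r : List Int) :
    PySem.List.pyGetD (a0 :: a1 :: a2 :: a3 :: r) (0 : Int) 0 = a0 ∧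
    PySem.List.pyGetD (a0 :: a1 :: a2 :: a3 :: r) (1 : Int) 0 = a1 ∧
    PySem.List.pyGetD (a0 :: a1 :: a2 :: a3 :: r) (2 : Int) 0 = a2 ∧
    PySem.List.pyGetD (a0 :: a1 :: a2 :: a3 :: r) (3 : Int) 0 = a3 := by
  refine ⟨?_, ?_, ?_, ?_⟩ <;>
    (simp [PySem.List.pyGetD, PySem.List.pyGet?, PySem.List.pyIdx?]
     rw [if_pos (by omega)]
     simp)

theorem pyGetD_rows4 (a b c d : List Int) (rest : List (List Int)) :
    PySem.List.pyGetD (a :: b :: c :: d :: rest) (0 : Int) [] = a ∧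
    PySem.List.pyGetD (a :: b :: c :: d :: rest) (1 : Int) [] = b ∧
    PySem.List.pyGetD (a :: b :: c :: d :: rest) (2 : Int) [] = c ∧
    PySem.List.pyGetD (a :: b :: c :: d :: rest) (3 : Int) [] = d := by
  refine ⟨?_, ?_, ?_, ?_⟩ <;>
    (simp [PySem.List.pyGetD, PySem.List.pyGet?, PySem.List.pyIdx?]
     rw [if_pos (by omega)]
     simp)

-- ===== VERDICT (by name: the statement is the Claim_ definition above) =====
theorem encode_rows_from_matrix_py_spec : Claim_equal_encode_rows_from_matrix_py := by
  intro matrix _ hpre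
  obtain ⟨hlen, hrows⟩ := hpre
  match matrix, hlen with
  | a :: b :: c :: d :: rest, _ =>
    have ha : 4 ≤ a.length := hrows a (by simp)
    have hb : 4 ≤ b.length := hrows b (by simp)
    have hc : 4 ≤ c.length := hrows c (by simp)
    have hd : 4 ≤ d.length := hrows d (by simp)
    match a, ha, b, hb, c, hc, d, hd with
    | a0 :: a1 :: a2 :: a3 :: ar, _, b0 :: b1 :: b2 :: b3 :: br, _,
      c0 :: c1 :: c2 :: c3 :: cr, _, d0 :: d1 :: d2 :: d3 :: dr, _ =>
      unfold Spec_encode_rows_from_matrix_py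
      unfold encode_rows_from_matrix_py encode_rows_from_matrix_py_alt
      have hrange : PySem.List.pyRange 0 4 1 = [0, 1, 2, 3] := by decide
      have henum : ∀ k0 k1 k2 k3 : Int, PySem.List.enumerate [k0, k1, k2, k3] =
          [((0 : Int), k0), ((1 : Int), k1), ((2 : Int), k2), ((3 : Int), k3)] := by
        intro k0 k1 k2 k3
        simp [PySem.List.enumerate_cons]
      obtain ⟨gr0, gr1, gr2, gr3⟩ := pyGetD_rows4 (a0 :: a1 :: a2 :: a3 :: ar)
        (b0 :: b1 :: b2 :: b3 :: br) (c0 :: c1 :: c2 :: c3 :: cr) (d0 :: d1 :: d2 :: d3 :: dr) rest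
      obtain ⟨ga0, ga1, ga2, ga3⟩ := pyGetD_cons4 a0 a1 a2 a3 ar
      obtain ⟨gb0, gb1, gb2, gb3⟩ := pyGetD_cons4 b0 b1 b2 b3 br
      obtain ⟨gc0, gc1, gc2, gc3⟩ := pyGetD_cons4 c0 c1 c2 c3 cr
      obtain ⟨gd0, gd1, gd2, gd3⟩ := pyGetD_cons4 d0 d1 d2 d3 dr
      rw [hrange]
      simp only [List.foldl, henum, List.map, List.nil_append, List.cons_append,
        gr0, gr1, gr2, gr3, ga0, ga1, ga2, ga3, gb0, gb1, gb2, gb3,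
        gc0, gc1, gc2, gc3, gd0, gd1, gd2, gd3]
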